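-- pv_equiv track=rewrite | github.com/sandipan898/sample-coding-question-solutions | python/34_replace_ones.py | replace_zeros
-- ===== SOURCE A (Python) =====
-- def reverse_number(number):
--     sum = 0
--     while number > 0:
--         rem = number % 10
--         sum = sum * 10 + rem
--         number = number // 10
--     return sum
--
-- def replace_zeros(number):
--     sum = 0
--     while number > 0:
--         rem = number % 10
--         number = number // 10
--         if rem == 0:
--             rem = 1
--         sum = sum * 10 + rem
--     return reverse_number(sum)
-- ===== SOURCE B (Python) =====
-- def replace_zeros(number):
--     # Direct recursion on the digits: replace each zero digit in place,
--     # no intermediate reversed accumulator and no second reversal pass.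
--     if number <= 0:
--         return 0
--     d = number % 10
--     return replace_zeros(number // 10) * 10 + (1 if d == 0 else d)
-- ===== Notes on version B (the rewrite author's own statement) =====
-- stated objective: simpler
-- what changed: B replaces zero digits by direct recursion that rebuilds the number most-significant-first in one pass, instead of A's two while-loops that first build a reversed replaced number and then reverse it again.
import Mathlib
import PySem

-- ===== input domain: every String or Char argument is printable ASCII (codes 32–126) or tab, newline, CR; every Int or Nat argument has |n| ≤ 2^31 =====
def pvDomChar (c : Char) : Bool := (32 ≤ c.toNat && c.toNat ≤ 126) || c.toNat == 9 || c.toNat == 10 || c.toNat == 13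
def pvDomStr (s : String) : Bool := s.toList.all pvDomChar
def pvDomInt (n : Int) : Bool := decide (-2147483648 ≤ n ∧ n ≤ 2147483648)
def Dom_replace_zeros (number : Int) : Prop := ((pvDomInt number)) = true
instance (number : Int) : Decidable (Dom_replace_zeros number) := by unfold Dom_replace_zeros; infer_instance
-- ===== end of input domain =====

-- B replaces zero digits by one direct recursion over the digits instead of A's
-- two while-loops (build reversed replaced number, then reverse it again): simpler, same cost.


-- ===== PORT A =====
-- while-loop of reverse_number, state (number, sum)
def reverse_number_loop (number sum : Int) : Int :=
  if number > 0 then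
    reverse_number_loop (PySem.Int.floordiv number 10) (sum * 10 + PySem.Int.mod number 10)
  else sum
termination_by number.toNat
decreasing_by
  rename_i h
  rw [PySem.Int.floordiv_eq_ediv_of_pos (by norm_num)]
  omega

def reverse_number (number : Int) : Int := reverse_number_loop number 0

-- while-loop of replace_zeros, state (number, sum)
def replace_zeros_loop (number sum : Int) : Int :=
  if number > 0 then
    let rem := PySem.Int.mod number 10
    replace_zeros_loop (PySem.Int.floordiv number 10)
      (sum * 10 + (if rem == 0 then 1 else rem))
  else sum
termination_by number.toNat
decreasing_by
  rename_i h
  rw [PySem.Int.floordiv_eq_ediv_of_pos (by norm_num)]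
  omega

def replace_zeros (number : Int) : Int := reverse_number (replace_zeros_loop number 0)

-- ===== PORT B =====
def replace_zeros_alt (number : Int) : Int :=
  if number ≤ 0 then 0
  else
    let d := PySem.Int.mod number 10
    replace_zeros_alt (PySem.Int.floordiv number 10) * 10 + (if d == 0 then 1 else d)
termination_by number.toNat
decreasing_by
  rename_i h
  rw [PySem.Int.floordiv_eq_ediv_of_pos (by norm_num)]
  omega

-- ===== PRECONDITION & SPEC =====
def Spec_replace_zeros (number : Int) (out : Int) : Prop := out = replace_zeros_alt number
instance (number : Int) (out : Int) : Decidable (Spec_replace_zeros number out) := by unfold Spec_replace_zeros; infer_instance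

-- ===== CLAIM (what is proved, stated in full; the proofs are below) =====
def Claim_equal_replace_zeros : Prop := ∀ (number : Int), Dom_replace_zeros number → Spec_replace_zeros number (replace_zeros number)

-- ===== LEMMAS AND PROOFS =====

-- number of digits the loop consumes
def digCount (number : Int) : Nat :=
  if number > 0 then digCount (PySem.Int.floordiv number 10) + 1 else 0
termination_by number.toNat
decreasing_by
  rename_i h
  rw [PySem.Int.floordiv_eq_ediv_of_pos (by norm_num)]
  omega

theorem main_invariant (k : Nat) : ∀ (n : Int), n.toNat ≤ k → ∀ (s acc : Int), 0 ≤ s →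
    reverse_number_loop (replace_zeros_loop n s) acc
      = reverse_number_loop s (acc * (10 : Int) ^ digCount n + replace_zeros_alt n) := by
  induction k with
  | zero =>
    intro n hn s acc hs
    have hle : n ≤ 0 := by omega
    rw [replace_zeros_loop, digCount, replace_zeros_alt]
    simp [not_lt.mpr hle, hle]
  | succ k ih =>
    intro n hn s acc hs
    by_cases hpos : n > 0
    · have hdiv : PySem.Int.floordiv n 10 = n / 10 :=
        PySem.Int.floordiv_eq_ediv_of_pos (by norm_num)
      have hmod : PySem.Int.mod n 10 = n % 10 :=
        PySem.Int.mod_eq_emod_of_pos (by norm_num)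
      set r' : Int := if n % 10 == 0 then 1 else n % 10 with hr'
      have hr'b : 1 ≤ r' ∧ r' < 10 := by
        rw [hr']
        by_cases h0 : n % 10 = 0 <;> simp [h0]
        omega
      have htn : (n / 10).toNat ≤ k := by omega
      have hs' : 0 ≤ s * 10 + r' := by nlinarith [hr'b.1, hr'b.2]
      -- unfold one step of the A-loop
      rw [replace_zeros_loop]
      simp only [hpos, if_pos, hmod, hdiv, ← hr']
      rw [ih (n / 10) htn (s * 10 + r') acc hs']
      -- peel one step of reverse_number_loop at s*10+r'
      have hsp : s * 10 + r' > 0 := by nlinarith [hr'b.1]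
      rw [reverse_number_loop]
      simp only [hsp, if_pos]
      have hm2 : PySem.Int.mod (s * 10 + r') 10 = r' := by
        rw [PySem.Int.mod_eq_emod_of_pos (by norm_num)]; omega
      have hd2 : PySem.Int.floordiv (s * 10 + r') 10 = s := by
        rw [PySem.Int.floordiv_eq_ediv_of_pos (by norm_num)]; omega
      rw [hm2, hd2]
      -- match the right-hand side
      conv_rhs => rw [digCount, replace_zeros_alt]
      simp only [hpos, if_pos, not_le.mpr hpos, if_false, hmod, hdiv, ← hr']
      ring_nf
    · rw [replace_zeros_loop, digCount, replace_zeros_alt]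
      simp [hpos, not_lt.mp hpos]

-- ===== VERDICT (by name: the statement is the Claim_ definition above) =====
theorem replace_zeros_spec : Claim_equal_replace_zeros := by
  intro n _
  unfold Spec_replace_zeros replace_zeros reverse_number
  by_cases hle : n ≤ 0
  · rw [replace_zeros_loop, replace_zeros_alt]
    simp [not_lt.mpr hle, hle, reverse_number_loop]
  · have := main_invariant n.toNat n (le_refl _) 0 0 (le_refl 0)
    rw [this, reverse_number_loop]
    norm_num
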